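-- pv_equiv track=rewrite | github.com/won-N-only/algorithm_python | algorithm/hw/prac2nm/4.py | hungry
-- ===== SOURCE A (Python) =====
-- def hungry(arr, m):
--     if m == 0:
--         return [[]]
--     res = []
--     for i in range(len(arr)):
--         st = arr[i]
--         for am in hungry(arr[:i]+arr[i:], m-1):
--             res.append([st]+am)
--     return res
-- ===== SOURCE B (Python) =====
-- def hungry(arr, m):
--     res = [[]]
--     for _ in range(m):
--         res = [seq + [x] for seq in res for x in arr]
--     return res
-- ===== Notes on version B (the rewrite author's own statement) =====
-- stated objective: alternative
-- what changed: Replaces the recursion (which rebuilds arr with arr[:i]+arr[i:] and prepends per element at every level) by an iterative product: start from [[]] and m times extend every partial sequence on the right by every element of arr.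
-- outside the precondition, e.g. on hungry([], -1): A returns [], B returns [[]]
import Mathlib
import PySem

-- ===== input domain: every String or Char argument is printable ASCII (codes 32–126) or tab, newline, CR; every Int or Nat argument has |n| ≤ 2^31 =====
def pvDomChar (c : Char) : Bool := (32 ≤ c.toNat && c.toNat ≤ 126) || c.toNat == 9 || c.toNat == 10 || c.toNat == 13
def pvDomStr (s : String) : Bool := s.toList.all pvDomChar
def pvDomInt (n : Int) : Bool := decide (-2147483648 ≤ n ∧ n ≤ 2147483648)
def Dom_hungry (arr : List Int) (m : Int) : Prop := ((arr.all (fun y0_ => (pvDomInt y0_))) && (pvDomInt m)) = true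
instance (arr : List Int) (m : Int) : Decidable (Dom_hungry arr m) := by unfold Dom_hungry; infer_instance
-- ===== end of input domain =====

-- B replaces A's recursion by an iterative build of the Cartesian product (same result, different decomposition).


-- ===== PORT A =====
-- A recurses on m; inside Pre_ (0 ≤ m) the recursion depth is exactly m,
-- so the port recurses on the Nat m.toNat (for m < 0 A never returns: outside Pre_).
-- arr[:i]+arr[i:] → arr.take i ++ arr.drop i; arr[i] with i ∈ range(len(arr)) → arr.getD i 0 (exact: i in range).
def hungryNat (arr : List Int) : Nat → List (List Int)
  | 0 => [[]]
  | n+1 => (List.range arr.length).foldl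
      (fun res i =>
        res ++ (hungryNat (arr.take i ++ arr.drop i) n).map (fun am => arr.getD i 0 :: am)) []

def hungry (arr : List Int) (m : Int) : List (List Int) := hungryNat arr m.toNat

-- ===== PORT B =====
-- res = [[]]; for _ in range(m): res = [seq + [x] for seq in res for x in arr]
def hungry_alt (arr : List Int) (m : Int) : List (List Int) :=
  (List.range m.toNat).foldl
    (fun res _ => res.flatMap (fun seq => arr.map (fun x => seq ++ [x]))) [[]]

-- ===== PRECONDITION & SPEC =====
-- Pre_ excludes m < 0: there A raises RecursionError for nonempty arr, and for arr = [] its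
-- accidental value [] (vs B's [[]]) is an unspecified corner neither behaviour is mandated on.
def Pre_hungry (arr : List Int) (m : Int) : Prop := 0 ≤ m
instance (arr : List Int) (m : Int) : Decidable (Pre_hungry arr m) := by unfold Pre_hungry; infer_instance
def pvWitness_hungry : List Int × Int := ([1, 2], 2)

def Spec_hungry (arr : List Int) (m : Int) (out : List (List Int)) : Prop := out = hungry_alt arr m
instance (arr : List Int) (m : Int) (out : List (List Int)) : Decidable (Spec_hungry arr m out) := by unfold Spec_hungry; infer_instance

-- ===== CLAIM (what is proved, stated in full; the proofs are below) =====
def Claim_equal_hungry : Prop := ∀ (arr : List Int) (m : Int), Dom_hungry arr m → Pre_hungry arr m → Spec_hungry arr m (hungry arr m)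

-- ===== LEMMAS AND PROOFS =====

-- canonical recursive product: prepend each element of arr to each (n)-sequence
def prodA (arr : List Int) : Nat → List (List Int)
  | 0 => [[]]
  | n+1 => arr.flatMap (fun x => (prodA arr n).map (fun s => x :: s))

-- A's index loop is a flatMap over the elements
theorem foldl_range_getD (xs : List Int) (g : Int → List (List Int)) :
    ∀ acc : List (List Int),
      (List.range xs.length).foldl (fun res i => res ++ g (xs.getD i 0)) acc
        = acc ++ xs.flatMap g := by
  induction xs with
  | nil => intro acc; simp
  | cons x t ih =>
      intro acc
      simp only [List.length_cons, List.range_succ_eq_map, List.foldl_cons, List.foldl_map,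
        List.getD_cons_zero, List.getD_cons_succ, List.flatMap_cons]
      rw [ih]
      simp

theorem hungryNat_eq_prodA : ∀ (n : Nat) (arr : List Int), hungryNat arr n = prodA arr n := by
  intro n
  induction n with
  | zero => intro arr; rfl
  | succ n ih =>
      intro arr
      show (List.range arr.length).foldl
          (fun res i =>
            res ++ (hungryNat (arr.take i ++ arr.drop i) n).map (fun am => arr.getD i 0 :: am)) []
        = prodA arr (n+1)
      simp only [List.take_append_drop, ih]
      rw [foldl_range_getD arr (fun v => (prodA arr n).map (fun am => v :: am)) []]
      rfl

-- extending every sequence on the right by every element of arr advances prodA by one step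
theorem step_prodA (arr : List Int) :
    ∀ n : Nat,
      (prodA arr n).flatMap (fun seq => arr.map (fun x => seq ++ [x])) = prodA arr (n+1) := by
  intro n
  induction n with
  | zero => simp [prodA]; induction arr <;> simp_all
  | succ n ih =>
      show (arr.flatMap (fun x => (prodA arr n).map (fun s => x :: s))).flatMap
            (fun seq => arr.map (fun x => seq ++ [x])) = prodA arr (n+2)
      rw [List.flatMap_assoc]
      have h : ∀ x : Int,
          ((prodA arr n).map (fun s => x :: s)).flatMap (fun seq => arr.map (fun y => seq ++ [y]))
            = (prodA arr (n+1)).map (fun s => x :: s) := by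
        intro x
        rw [List.flatMap_map, ← ih, List.map_flatMap]
        apply List.flatMap_congr
        intro s _
        simp
      simp only [h]
      rfl

theorem foldl_step_eq_prodA (arr : List Int) :
    ∀ n : Nat,
      (List.range n).foldl
          (fun res _ => res.flatMap (fun seq => arr.map (fun x => seq ++ [x]))) [[]]
        = prodA arr n := by
  intro n
  induction n with
  | zero => rfl
  | succ n ih => rw [List.range_succ, List.foldl_append, ih, List.foldl_cons, List.foldl_nil,
      step_prodA]

-- ===== VERDICT (by name: the statement is the Claim_ definition above) =====
theorem hungry_spec : Claim_equal_hungry := by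
  intro arr m _ _
  show hungry arr m = hungry_alt arr m
  rw [hungry, hungry_alt, hungryNat_eq_prodA, foldl_step_eq_prodA]
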